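-- pv_equiv track=rewrite | github.com/cdrguru/portable-agent-kit | .agent/tools/utilities/skills.py | _first_nonempty_body_line
-- ===== SOURCE A (Python) =====
-- from typing import Iterable, List, Optional, Tuple
--
-- def _strip_frontmatter(text: str) -> str:
--     lines = text.splitlines()
--     if not lines or lines[0].strip() != "---":
--         return text
--     for i in range(1, len(lines)):
--         if lines[i].strip() == "---":
--             return "\n".join(lines[i + 1 :])
--     return text
--
-- def _first_nonempty_body_line(text: str) -> Optional[str]:
--     body = _strip_frontmatter(text)
--     for raw in body.splitlines():
--         stripped = raw.strip()
--         if not stripped: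
--             continue
--         if stripped.startswith("#"):
--             continue
--         return stripped
--     return None
-- ===== SOURCE B (Python) =====
-- from typing import Optional
--
--
-- def _first_nonempty_body_line(text: str) -> Optional[str]:
--     # One forward pass, no slicing or rejoining: keep two candidates and pick at the end.
--     whole = None      # first non-empty non-'#' stripped line of the entire text
--     after = None      # first such line strictly after a closed frontmatter block
--     open_fm = False
--     closed = False
--     for i, raw in enumerate(text.splitlines()):
--         s = raw.strip()
--         if i == 0:
--             open_fm = (s == "---")
--         elif open_fm and not closed and s == "---":
--             closed = True
--             continue
--         if whole is None and s and not s.startswith("#"):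
--             whole = s
--         if closed and after is None and s and not s.startswith("#"):
--             after = s
--     return after if (open_fm and closed) else whole
-- ===== Notes on version B (the rewrite author's own statement) =====
-- stated objective: alternative
-- what changed: B replaces A's two-stage strip-frontmatter(join+resplit)-then-scan with a single forward state-machine pass over enumerate(splitlines): it tracks two candidate answers (first acceptable line of the whole text, and first acceptable line after a closed frontmatter) plus open/closed flags, and selects between the candidates at the end, never slicing or rebuilding strings.
import Mathlib
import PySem

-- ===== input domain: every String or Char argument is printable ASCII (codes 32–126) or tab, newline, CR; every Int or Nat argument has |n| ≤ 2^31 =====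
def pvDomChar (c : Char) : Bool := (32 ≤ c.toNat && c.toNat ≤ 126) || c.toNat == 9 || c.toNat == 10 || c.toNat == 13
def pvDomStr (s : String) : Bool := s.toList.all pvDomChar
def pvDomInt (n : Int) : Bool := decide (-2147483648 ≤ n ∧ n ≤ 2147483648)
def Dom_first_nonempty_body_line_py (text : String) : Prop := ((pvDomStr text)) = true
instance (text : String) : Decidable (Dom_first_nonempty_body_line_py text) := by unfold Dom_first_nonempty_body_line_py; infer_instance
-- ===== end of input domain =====

-- B replaces A's two-stage strip-frontmatter(join+resplit)-then-scan by one forward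
-- state-machine pass keeping two candidate answers and selecting at the end (objective: alternative).

-- ===== PORT A =====
-- A's inner 'for i in range(1, len(lines))' searching for the closing '---':
-- recursion over lines[1:], returning lines[i+1:] at the first hit (early return).
def pvAFindClose : List String → Option (List String)
  | [] => none
  | l :: rest => if PySem.Str.strip l = "---" then some rest else pvAFindClose rest

-- _strip_frontmatter
def pvAStripFrontmatter (text : String) : String :=
  match PySem.Str.splitlines text with
  | [] => text
  | l0 :: rest =>
    if PySem.Str.strip l0 ≠ "---" then text
    else
      match pvAFindClose rest with
      | some suf => PySem.Str.join "\n" suf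
      | none => text

-- the 'for raw in body.splitlines()' loop with its two 'continue's and early return
def pvAScan : List String → Option String
  | [] => none
  | raw :: rest =>
    let stripped := PySem.Str.strip raw
    if stripped = "" then pvAScan rest
    else if PySem.Str.startswith stripped "#" then pvAScan rest
    else some stripped

def first_nonempty_body_line_py (text : String) : Option String :=
  pvAScan (PySem.Str.splitlines (pvAStripFrontmatter text))

-- ===== PORT B =====
-- the two candidate-recording 'if's at the bottom of B's loop body
def pvBRecord (whole after : Option String) (closed : Bool) (s : String) :
    Option String × Option String :=
  let whole := if whole = none ∧ s ≠ "" ∧ PySem.Str.startswith s "#" = false then some s else whole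
  let after := if closed = true ∧ after = none ∧ s ≠ "" ∧ PySem.Str.startswith s "#" = false then some s else after
  (whole, after)

-- one iteration of B's 'for i, raw in enumerate(lines)' loop over state (whole, after, open_fm, closed)
def pvBStep (st : Option String × Option String × Bool × Bool) (p : Int × String) :
    Option String × Option String × Bool × Bool :=
  match st with
  | (whole, after, openFm, closed) =>
    let s := PySem.Str.strip p.2
    if p.1 = 0 then
      let openFm := decide (s = "---")
      let (w, a) := pvBRecord whole after closed s
      (w, a, openFm, closed)
    else if openFm = true ∧ closed = false ∧ s = "---" then
      (whole, after, openFm, true)   -- 'closed = True; continue'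
    else
      let (w, a) := pvBRecord whole after closed s
      (w, a, openFm, closed)

def first_nonempty_body_line_py_alt (text : String) : Option String :=
  match (PySem.List.enumerate (PySem.Str.splitlines text) 0).foldl pvBStep
      (none, none, false, false) with
  | (whole, after, openFm, closed) => if openFm = true ∧ closed = true then after else whole

-- ===== PRECONDITION & SPEC =====
def Spec_first_nonempty_body_line_py (text : String) (out : Option String) : Prop := out = first_nonempty_body_line_py_alt text
instance (text : String) (out : Option String) : Decidable (Spec_first_nonempty_body_line_py text out) := by unfold Spec_first_nonempty_body_line_py; infer_instance

-- ===== CLAIM (what is proved, stated in full; the proofs are below) =====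
def Claim_equal_first_nonempty_body_line_py : Prop := ∀ (text : String), Dom_first_nonempty_body_line_py text → Spec_first_nonempty_body_line_py text (first_nonempty_body_line_py text)

-- ===== LEMMAS AND PROOFS =====

-- the line-break predicate splitlines uses, as a named definition (defeq to the inline one)
def pvIsBrk (c : Char) : Bool :=
  have n := c.toNat
  decide (n = 10) || decide (n = 13) || decide (n = 11) || decide (n = 12) || decide (n = 28) || decide (n = 29) ||
          decide (n = 30) ||
        decide (n = 133) ||
      decide (n = 8232) ||
    decide (n = 8233)

theorem pv_splitlines_eq_go (s : List Char) :
    PySem.Chars.splitlines s = PySem.Chars.splitlines.go pvIsBrk s [] [] := rfl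

-- step lemmas for PySem.Chars.splitlines.go (its three match arms)
theorem pv_go_crlf (p : Char → Bool) (rest cur acc) :
    PySem.Chars.splitlines.go p ('\x0d' :: '\n' :: rest) cur acc
      = PySem.Chars.splitlines.go p rest [] (cur.reverse :: acc) := rfl

theorem pv_go_nil (p : Char → Bool) (cur acc) :
    PySem.Chars.splitlines.go p [] cur acc =
      if cur.isEmpty then acc.reverse else (cur.reverse :: acc).reverse := rfl

theorem pv_go_brk (p : Char → Bool) (c : Char) (rest cur acc) (h : p c = true)
    (hne : ∀ r, c = '\x0d' → rest = '\n' :: r → False) :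
    PySem.Chars.splitlines.go p (c :: rest) cur acc
      = PySem.Chars.splitlines.go p rest [] (cur.reverse :: acc) := by
  rw [PySem.Chars.splitlines.go.eq_def]
  split
  · rename_i heq; simp at heq
  · rename_i r heq
    injection heq with h1 h2
    exact (hne r h1 h2).elim
  · rename_i heq
    injection heq with h1 h2
    subst h1; subst h2; simp [h]

theorem pv_go_nobrk (p : Char → Bool) (c : Char) (rest cur acc) (h : p c = false) (hc : c ≠ '\x0d') :
    PySem.Chars.splitlines.go p (c :: rest) cur acc
      = PySem.Chars.splitlines.go p rest (c :: cur) acc := by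
  rw [PySem.Chars.splitlines.go.eq_def]
  split
  · rename_i heq; simp at heq
  · rename_i r heq; injection heq with h1 h2; exact absurd h1 hc
  · rename_i heq
    injection heq with h1 h2
    subst h1; subst h2; simp [h]

-- go is the acc-free run appended to acc.reverse
theorem pv_go_acc (p : Char → Bool) (hp : p '\x0d' = true) (s cur : List Char) (accd : List (List Char)) :
    ∀ acc, PySem.Chars.splitlines.go p s cur acc = acc.reverse ++ PySem.Chars.splitlines.go p s cur [] := by
  induction s, cur, accd using PySem.Chars.splitlines.go.induct p with
  | case1 cur acc h => intro a; rw [pv_go_nil, pv_go_nil]; simp [h]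
  | case2 cur acc h => intro a; rw [pv_go_nil, pv_go_nil]; simp [h]
  | case3 rest cur acc ih =>
      intro a
      rw [pv_go_crlf, pv_go_crlf, ih (cur.reverse :: a), ih [cur.reverse]]
      simp
  | case4 c rest cur acc hne h ih =>
      intro a
      rw [pv_go_brk p c rest cur a h (fun r h1 h2 => hne r h1 h2),
          pv_go_brk p c rest cur [] h (fun r h1 h2 => hne r h1 h2),
          ih (cur.reverse :: a), ih [cur.reverse]]
      simp
  | case5 c rest cur acc hne h ih =>
      intro a
      have h' : p c = false := by simpa using h
      have hc : c ≠ '\x0d' := by intro hceq; rw [hceq, hp] at h'; exact absurd h' (by decide)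
      rw [pv_go_nobrk p c rest cur a h' hc, pv_go_nobrk p c rest cur [] h' hc, ih a]

theorem pv_go_acc' (p : Char → Bool) (hp : p '\x0d' = true) (s cur : List Char) (acc : List (List Char)) :
    PySem.Chars.splitlines.go p s cur acc = acc.reverse ++ PySem.Chars.splitlines.go p s cur [] :=
  pv_go_acc p hp s cur [] acc

-- a break-free prefix is just accumulated into cur
theorem pv_go_prefix (p : Char → Bool) (hp : p '\x0d' = true) (l : List Char)
    (hl : ∀ c ∈ l, p c = false) (s cur acc) :
    PySem.Chars.splitlines.go p (l ++ s) cur acc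
      = PySem.Chars.splitlines.go p s (l.reverse ++ cur) acc := by
  induction l generalizing cur with
  | nil => simp
  | cons c l' ih =>
      have hc : p c = false := hl c (by simp)
      have hcr : c ≠ '\x0d' := by intro hceq; rw [hceq, hp] at hc; exact absurd hc (by decide)
      rw [List.cons_append, pv_go_nobrk p c (l' ++ s) cur acc hc hcr,
          ih (fun d hd => hl d (by simp [hd])) (c :: cur)]
      simp

-- every line splitlines produces is free of break characters
theorem pv_go_mem (p : Char → Bool) (hp : p '\x0d' = true) (s cur : List Char) (acc : List (List Char)) :
    (∀ c ∈ cur, p c = false) → (∀ l ∈ acc, ∀ c ∈ l, p c = false) →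
    ∀ l ∈ PySem.Chars.splitlines.go p s cur acc, ∀ c ∈ l, p c = false := by
  induction s, cur, acc using PySem.Chars.splitlines.go.induct p with
  | case1 cur acc h =>
      intro hcur hacc l hl
      rw [pv_go_nil] at hl
      simp [h] at hl
      exact hacc l hl
  | case2 cur acc h =>
      intro hcur hacc l hl
      rw [pv_go_nil] at hl
      simp [h] at hl
      rcases hl with hl | hl
      · exact hacc l hl
      · subst hl; intro c hc; exact hcur c (by simpa using hc)
  | case3 rest cur acc ih =>
      intro hcur hacc
      rw [pv_go_crlf]
      exact ih (by simp) (by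
        intro l hl
        rcases (by simpa using hl : l = cur.reverse ∨ l ∈ acc) with hl' | hl'
        · subst hl'; intro c hc; exact hcur c (by simpa using hc)
        · exact hacc l hl')
  | case4 c rest cur acc hne h ih =>
      intro hcur hacc
      rw [pv_go_brk p c rest cur acc h (fun r h1 h2 => hne r h1 h2)]
      exact ih (by simp) (by
        intro l hl
        rcases (by simpa using hl : l = cur.reverse ∨ l ∈ acc) with hl' | hl'
        · subst hl'; intro d hd; exact hcur d (by simpa using hd)
        · exact hacc l hl')
  | case5 c rest cur acc hne h ih =>
      intro hcur hacc
      have h' : p c = false := by simpa using h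
      have hc : c ≠ '\x0d' := by intro hceq; rw [hceq, hp] at h'; exact absurd h' (by decide)
      rw [pv_go_nobrk p c rest cur acc h' hc]
      exact ih (by
        intro d hd
        rcases (by simpa using hd : d = c ∨ d ∈ cur) with hd' | hd'
        · subst hd'; exact h'
        · exact hcur d hd') hacc

theorem pvIsBrk_cr : pvIsBrk '\x0d' = true := by decide

theorem pv_splitlines_mem (s : String) :
    ∀ l ∈ PySem.Str.splitlines s, ∀ c ∈ l.toList, pvIsBrk c = false := by
  intro l hl c hc
  simp only [PySem.Str.splitlines, List.mem_map] at hl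
  obtain ⟨cs, hcs, rfl⟩ := hl
  rw [pv_splitlines_eq_go] at hcs
  exact pv_go_mem pvIsBrk pvIsBrk_cr s.toList [] [] (by simp) (by simp) cs hcs c (by simpa using hc)

-- splitlines of a break-free string
theorem pv_splitlines_breakfree (l : List Char) (hl : ∀ c ∈ l, pvIsBrk c = false) :
    PySem.Chars.splitlines l = if l = [] then [] else [l] := by
  rw [pv_splitlines_eq_go, ← List.append_nil l,
      pv_go_prefix pvIsBrk pvIsBrk_cr l hl [] [] []]
  rw [pv_go_nil]
  cases l with
  | nil => simp
  | cons c t => simp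

-- splitlines eats one '\n' after a break-free line
theorem pv_splitlines_cons_nl (l t : List Char) (hl : ∀ c ∈ l, pvIsBrk c = false) :
    PySem.Chars.splitlines (l ++ '\n' :: t) = l :: PySem.Chars.splitlines t := by
  rw [pv_splitlines_eq_go, pv_go_prefix pvIsBrk pvIsBrk_cr l hl ('\n' :: t) [] []]
  rw [pv_go_brk pvIsBrk '\n' t (l.reverse ++ []) [] (by decide)
        (fun r h1 _ => by simp at h1)]
  rw [pv_go_acc' pvIsBrk pvIsBrk_cr t []]
  rw [pv_splitlines_eq_go]
  simp

theorem pvAScan_cons (raw : String) (rest : List String) :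
    pvAScan (raw :: rest) =
      (if PySem.Str.strip raw = "" then pvAScan rest
       else if PySem.Str.startswith (PySem.Str.strip raw) "#" then pvAScan rest
       else some (PySem.Str.strip raw)) := rfl

-- scanning the re-split joined body = scanning the lines themselves
theorem pv_scan_join (parts : List String)
    (h : ∀ s ∈ parts, ∀ c ∈ s.toList, pvIsBrk c = false) :
    pvAScan (PySem.Str.splitlines (PySem.Str.join "\n" parts)) = pvAScan parts := by
  induction parts with
  | nil => rfl
  | cons sp q ih =>
      cases q with
      | nil =>
          have hsp := h sp (by simp)
          have hsplit : PySem.Str.splitlines (PySem.Str.join "\n" [sp])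
              = if sp.toList = [] then [] else [sp] := by
            simp only [PySem.Str.splitlines, PySem.Str.toList_join, List.map_cons, List.map_nil,
              PySem.Chars.join_singleton]
            rw [pv_splitlines_breakfree sp.toList hsp]
            by_cases hnil : sp.toList = []
            · simp [hnil]
            · simp [hnil]
          rw [hsplit]
          by_cases hnil : sp.toList = []
          · have hsp0 : sp = "" := by cases sp; simp_all
            simp only [hsp0]
            rfl
          · simp [hnil]
      | cons q2 t =>
          have hsp := h sp (by simp)
          have hjoin : (PySem.Str.join "\n" (sp :: q2 :: t)).toList
              = sp.toList ++ '\n' :: (PySem.Str.join "\n" (q2 :: t)).toList := by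
            simp only [PySem.Str.toList_join, List.map_cons]
            rw [PySem.Chars.join_cons_cons, ← List.map_cons, ← PySem.Str.toList_join]
            have hnl : "\n".toList = ['\n'] := by decide
            rw [hnl]
            simp
          have hsplit : PySem.Str.splitlines (PySem.Str.join "\n" (sp :: q2 :: t))
              = sp :: PySem.Str.splitlines (PySem.Str.join "\n" (q2 :: t)) := by
            simp only [PySem.Str.splitlines]
            rw [hjoin, pv_splitlines_cons_nl sp.toList _ hsp]
            simp
          rw [hsplit]
          have ih' := ih (fun s hs c hc => h s (by simp [hs]) c hc)
          rw [pvAScan_cons, pvAScan_cons, ih']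

-- B-side fold lemmas.
theorem pvBStep_ne_zero (w a : Option String) (o c : Bool) (p : Int × String) (hp : p.1 ≠ 0) :
    pvBStep (w, a, o, c) p =
      (if o = true ∧ c = false ∧ PySem.Str.strip p.2 = "---" then (w, a, o, true)
       else ((pvBRecord w a c (PySem.Str.strip p.2)).1, (pvBRecord w a c (PySem.Str.strip p.2)).2, o, c)) := by
  unfold pvBStep
  dsimp only
  rw [if_neg hp]

-- absorbing one recorded candidate into Option.or with the remaining scan
theorem pv_or_record (w : Option String) (s : String) (r : Option String) :
    (if w = none ∧ s ≠ "" ∧ PySem.Str.startswith s "#" = false then some s else w).or r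
      = w.or (if s = "" then r else if PySem.Str.startswith s "#" = true then r else some s) := by
  by_cases h1 : s = ""
  · simp [h1]
  · by_cases h2 : PySem.Str.startswith s "#" = true
    · have hno : ¬ (w = none ∧ s ≠ "" ∧ PySem.Str.startswith s "#" = false) := by
        rintro ⟨-, -, hf⟩; rw [h2] at hf; exact absurd hf (by decide)
      rw [if_neg hno, if_neg h1, if_pos h2]
    · rw [if_neg h1, if_neg h2]
      cases w with
      | none => rw [if_pos ⟨rfl, h1, by simpa using h2⟩]; rfl
      | some v => rw [if_neg (by rintro ⟨hc, -⟩; exact Option.some_ne_none v hc)]; rfl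

-- folding in the closed state: 'after' (and 'whole') pick up the first acceptable line
theorem pv_fold_closed (ls : List String) (s : Int) (hs : s ≠ 0) (hstep : ∀ k : Nat, s + k ≠ 0)
    (w a : Option String) :
    (PySem.List.enumerate ls s).foldl pvBStep (w, a, true, true)
      = (w.or (pvAScan ls), a.or (pvAScan ls), true, true) := by
  induction ls generalizing s w a with
  | nil => simp [PySem.List.enumerate_nil, pvAScan]
  | cons l rest ih =>
      rw [PySem.List.enumerate_cons, List.foldl_cons,
          pvBStep_ne_zero w a true true (s, l) hs]
      rw [if_neg (by rintro ⟨-, h, -⟩; exact absurd h (by simp))]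
      rw [ih (s + 1) (by have := hstep 1; simpa using this)
            (fun k => by have := hstep (k + 1); push_cast at this ⊢; omega)]
      simp only [pvBRecord, pvAScan_cons, true_and]
      rw [pv_or_record w, pv_or_record a]

-- folding in the open-unclosed state with 'whole' already decided
theorem pv_fold_open (ls : List String) (s : Int) (hs : s ≠ 0) (hstep : ∀ k : Nat, s + k ≠ 0)
    (w0 : String) :
    (PySem.List.enumerate ls s).foldl pvBStep (some w0, none, true, false)
      = (match pvAFindClose ls with
         | some suf => (some w0, pvAScan suf, true, true)
         | none => (some w0, none, true, false)) := by
  induction ls generalizing s with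
  | nil => simp [PySem.List.enumerate_nil, pvAFindClose]
  | cons l rest ih =>
      rw [PySem.List.enumerate_cons, List.foldl_cons,
          pvBStep_ne_zero (some w0) none true false (s, l) hs]
      by_cases hl : PySem.Str.strip l = "---"
      · rw [if_pos ⟨rfl, rfl, hl⟩]
        rw [pv_fold_closed rest (s + 1) (by have := hstep 1; simpa using this)
              (fun k => by have := hstep (k + 1); push_cast at this ⊢; omega) (some w0) none]
        simp [pvAFindClose, hl, Option.or]
      · rw [if_neg (by rintro ⟨-, -, hc⟩; exact hl hc)]
        have hrec : pvBRecord (some w0) none false (PySem.Str.strip l) = (some w0, none) := by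
          simp [pvBRecord]
        rw [hrec]
        rw [ih (s + 1) (by have := hstep 1; simpa using this)
              (fun k => by have := hstep (k + 1); push_cast at this ⊢; omega)]
        simp [pvAFindClose, hl]

-- folding with open_fm = false: only 'whole' accumulates
theorem pv_fold_noopen (ls : List String) (s : Int) (hs : s ≠ 0) (hstep : ∀ k : Nat, s + k ≠ 0)
    (w : Option String) :
    (PySem.List.enumerate ls s).foldl pvBStep (w, none, false, false)
      = (w.or (pvAScan ls), none, false, false) := by
  induction ls generalizing s w with
  | nil => simp [PySem.List.enumerate_nil, pvAScan]
  | cons l rest ih =>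
      rw [PySem.List.enumerate_cons, List.foldl_cons,
          pvBStep_ne_zero w none false false (s, l) hs]
      rw [if_neg (by rintro ⟨h, -⟩; exact absurd h (by simp))]
      rw [show (pvBRecord w none false (PySem.Str.strip l)).2 = none from by simp [pvBRecord]]
      rw [ih (s + 1) (by have := hstep 1; simpa using this)
            (fun k => by have := hstep (k + 1); push_cast at this ⊢; omega)]
      simp only [pvBRecord, pvAScan_cons]
      rw [pv_or_record w]

-- any element of the suffix returned by pvAFindClose is a member of the searched list
theorem pv_find_sub (rest : List String) (suf : List String)
    (h : pvAFindClose rest = some suf) : ∀ l ∈ suf, l ∈ rest := by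
  induction rest with
  | nil => simp [pvAFindClose] at h
  | cons x r ih =>
      by_cases hx : PySem.Str.strip x = "---"
      · simp only [pvAFindClose, if_pos hx] at h
        injection h with h
        subst h
        intro l hl; exact List.mem_cons_of_mem _ hl
      · simp only [pvAFindClose, if_neg hx] at h
        intro l hl; exact List.mem_cons_of_mem _ (ih h l hl)

-- ===== VERDICT (by name: the statement is the Claim_ definition above) =====
theorem first_nonempty_body_line_py_spec : Claim_equal_first_nonempty_body_line_py := by
  intro text _
  unfold Spec_first_nonempty_body_line_py
  cases hl : PySem.Str.splitlines text with
  | nil =>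
      unfold first_nonempty_body_line_py first_nonempty_body_line_py_alt pvAStripFrontmatter
      rw [hl]
      simp [PySem.List.enumerate_nil, pvAScan, hl]
  | cons l0 rest =>
      have hmem : ∀ l ∈ l0 :: rest, ∀ c ∈ l.toList, pvIsBrk c = false := by
        rw [← hl]; exact pv_splitlines_mem text
      have hA : first_nonempty_body_line_py text
          = pvAScan (PySem.Str.splitlines
              (if PySem.Str.strip l0 ≠ "---" then text
               else match pvAFindClose rest with
                    | some suf => PySem.Str.join "\n" suf
                    | none => text)) := by
        unfold first_nonempty_body_line_py pvAStripFrontmatter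
        rw [hl]
      have hB : first_nonempty_body_line_py_alt text
          = (match (PySem.List.enumerate (l0 :: rest) 0).foldl pvBStep (none, none, false, false) with
             | (whole, after, openFm, closed) => if openFm = true ∧ closed = true then after else whole) := by
        unfold first_nonempty_body_line_py_alt
        rw [hl]
      rw [hA, hB, PySem.List.enumerate_cons, List.foldl_cons]
      by_cases h0 : PySem.Str.strip l0 = "---"
      · have hstep0 : pvBStep (none, none, false, false) ((0 : Int), l0)
            = (some "---", none, true, false) := by
          unfold pvBStep pvBRecord
          dsimp only
          rw [if_pos rfl]
          simp only [h0]
          norm_num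
          decide
        rw [hstep0, if_neg (by simpa using h0),
            pv_fold_open rest (0 + 1) (by norm_num) (fun k => by push_cast; omega) "---"]
        cases hf : pvAFindClose rest with
        | none =>
            rw [hl, pvAScan_cons]
            rw [if_neg (by rw [h0]; decide), if_neg (by rw [h0]; decide), h0]
            rfl
        | some suf =>
            rw [(pv_scan_join suf (fun s hs => hmem s
                  (List.mem_cons_of_mem _ (pv_find_sub rest suf hf s hs))))]
            rfl
      · have hstep0 : pvBStep (none, none, false, false) ((0 : Int), l0)
            = ((pvBRecord none none false (PySem.Str.strip l0)).1, none, false, false) := by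
          unfold pvBStep
          dsimp only
          rw [if_pos rfl]
          simp [pvBRecord, h0]
        rw [hstep0, if_pos (by simpa using h0),
            pv_fold_noopen rest (0 + 1) (by norm_num) (fun k => by push_cast; omega)]
        rw [hl, pvAScan_cons]
        show pvAScan (l0 :: rest) = ((pvBRecord none none false (PySem.Str.strip l0)).1).or (pvAScan rest)
        rw [show (pvBRecord none none false (PySem.Str.strip l0)).1
              = (if (none : Option String) = none ∧ PySem.Str.strip l0 ≠ "" ∧
                    PySem.Str.startswith (PySem.Str.strip l0) "#" = false
                 then some (PySem.Str.strip l0) else none) from rfl]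
        rw [pv_or_record (none : Option String) (PySem.Str.strip l0) (pvAScan rest)]
        rw [pvAScan_cons]
        rfl
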